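-- pv_equiv track=rewrite | github.com/ToglivvilgoT/Advent-of-Code-2023 | day14.py | get_load
-- ===== SOURCE A (Python) =====
-- def get_load(row: str) -> int:
--     total_load = 0
--     max_load = len(row)
--     current_load = max_load
--
--     for i in range(len(row)):
--         if row[i] == 'O':
--             total_load += current_load
--             current_load -= 1
--
--         elif row[i] == '#':
--             current_load = max_load - i - 1
--
--     return total_load
-- ===== SOURCE B (Python) =====
-- def get_load(row: str) -> int:
--     # Segment decomposition: for each maximal run between '#' walls starting at
--     # index s with c rocks, add the arithmetic-series closed form
--     # c*(n - s) - c*(c - 1)//2 instead of accumulating per rock.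
--     n = len(row)
--     total = 0
--     start = 0
--     count = 0
--     for i, ch in enumerate(row):
--         if ch == '#':
--             total += count * (n - start) - count * (count - 1) // 2
--             start = i + 1
--             count = 0
--         elif ch == 'O':
--             count += 1
--     return total + count * (n - start) - count * (count - 1) // 2
-- ===== Notes on version B (the rewrite author's own statement) =====
-- stated objective: alternative
-- what changed: B groups the row into wall-delimited maximal segments, counting rocks per segment and adding the arithmetic-series closed form c*(n-start) - c*(c-1)//2 once per segment, replacing A's per-rock running current_load accumulator.
import Mathlib
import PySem

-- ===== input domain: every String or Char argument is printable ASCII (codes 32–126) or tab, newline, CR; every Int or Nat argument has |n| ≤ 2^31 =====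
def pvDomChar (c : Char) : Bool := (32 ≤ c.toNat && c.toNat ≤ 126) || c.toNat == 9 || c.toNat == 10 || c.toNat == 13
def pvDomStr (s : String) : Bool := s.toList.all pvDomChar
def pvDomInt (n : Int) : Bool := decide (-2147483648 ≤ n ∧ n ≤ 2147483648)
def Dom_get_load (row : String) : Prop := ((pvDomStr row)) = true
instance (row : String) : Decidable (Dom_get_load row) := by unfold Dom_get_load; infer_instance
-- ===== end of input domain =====

-- B replaces A's per-rock running-load accumulator by a per-segment closed-form
-- arithmetic-series sum (alternative decomposition, same O(n) cost).

-- ===== PORT A =====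
-- A's for-loop over indices, state (current_load, total_load), branches in source order.
def get_load_loopA (n : Int) : List Char → Int → Int → Int → Int
  | [], _, _, total => total
  | ch :: rest, i, cur, total =>
    if ch = 'O' then get_load_loopA n rest (i + 1) (cur - 1) (total + cur)
    else if ch = '#' then get_load_loopA n rest (i + 1) (n - i - 1) total
    else get_load_loopA n rest (i + 1) cur total

def get_load (row : String) : Int :=
  let maxLoad : Int := (PySem.Str.len row : Int)
  get_load_loopA maxLoad row.toList 0 maxLoad 0

-- ===== PORT B =====
-- closed-form load of one segment: start s, rock count c
def get_load_seg (n s c : Int) : Int :=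
  c * (n - s) - PySem.Int.floordiv (c * (c - 1)) 2

-- B's loop, state (total, start, count); flushes the last segment at the end.
def get_load_loopB (n : Int) : List Char → Int → Int → Int → Int → Int
  | [], _, total, s, c => total + get_load_seg n s c
  | ch :: rest, i, total, s, c =>
    if ch = '#' then get_load_loopB n rest (i + 1) (total + get_load_seg n s c) (i + 1) 0
    else if ch = 'O' then get_load_loopB n rest (i + 1) total s (c + 1)
    else get_load_loopB n rest (i + 1) total s c

def get_load_alt (row : String) : Int :=
  let n : Int := (PySem.Str.len row : Int)
  get_load_loopB n row.toList 0 0 0 0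

-- ===== PRECONDITION & SPEC =====
def Spec_get_load (row : String) (out : Int) : Prop := out = get_load_alt row
instance (row : String) (out : Int) : Decidable (Spec_get_load row out) := by unfold Spec_get_load; infer_instance

-- ===== CLAIM (what is proved, stated in full; the proofs are below) =====
def Claim_equal_get_load : Prop := ∀ (row : String), Dom_get_load row → Spec_get_load row (get_load row)

-- ===== LEMMAS AND PROOFS =====
theorem get_load_seg_zero (n s : Int) : get_load_seg n s 0 = 0 := by
  simp [get_load_seg, PySem.Int.floordiv]

theorem get_load_seg_succ (n s c : Int) :
    get_load_seg n s (c + 1) = get_load_seg n s c + (n - s - c) := by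
  unfold get_load_seg
  rw [PySem.Int.floordiv_eq_ediv_of_pos (by norm_num),
      PySem.Int.floordiv_eq_ediv_of_pos (by norm_num),
      show (c + 1) * ((c + 1) - 1) = c * (c - 1) + c * 2 by ring,
      Int.add_mul_ediv_right _ _ (by norm_num : (2 : Int) ≠ 0)]
  ring

theorem loopA_eq_loopB (n : Int) (cs : List Char) :
    ∀ (i total s c : Int),
      get_load_loopA n cs i (n - s - c) (total + get_load_seg n s c) =
        get_load_loopB n cs i total s c := by
  induction cs with
  | nil => intro i total s c; simp [get_load_loopA, get_load_loopB]
  | cons ch rest ih =>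
    intro i total s c
    by_cases hO : ch = 'O'
    · have hH : ¬ ch = '#' := by simp [hO]
      simp only [get_load_loopA, get_load_loopB, hO, if_true,
        if_neg (by decide : ¬ ('O' = '#'))]
      have := ih (i + 1) total s (c + 1)
      rw [get_load_seg_succ] at this
      have e1 : n - s - c - 1 = n - s - (c + 1) := by ring
      have e2 : total + get_load_seg n s c + (n - s - c) =
          total + (get_load_seg n s c + (n - s - c)) := by ring
      rw [e1, e2]
      exact this
    · by_cases hH : ch = '#'
      · simp only [get_load_loopA, get_load_loopB, hO, hH, if_false, if_true,
          if_neg (by decide : ¬ ('#' = 'O'))]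
        have := ih (i + 1) (total + get_load_seg n s c) (i + 1) 0
        rw [get_load_seg_zero, add_zero] at this
        have e1 : n - i - 1 = n - (i + 1) - 0 := by ring
        rw [e1]
        exact this
      · simp only [get_load_loopA, get_load_loopB, hO, hH, if_false]
        exact ih (i + 1) total s c

-- ===== VERDICT (by name: the statement is the Claim_ definition above) =====
theorem get_load_spec : Claim_equal_get_load := by
  intro row _
  unfold Spec_get_load get_load get_load_alt
  have h := loopA_eq_loopB ((PySem.Str.len row : Int)) row.toList 0 0 0 0
  rw [get_load_seg_zero, add_zero] at h
  simpa using h
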